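-- pv_equiv track=rewrite | github.com/oosuhada/codetest-study | 프로그래머스/0/120911. 문자열 정렬하기 （2）/20260422_093650_run_문자열 정렬하기 （2）.py | solution
-- ===== SOURCE A (Python) =====
-- def solution(my_string):
--     answer = []
--     for x in my_string:
--         if x.isupper:
--             answer.append(x.lower())
--         else:
--             answer.append(x)
--     answer.sort()
--     return "".join(answer)
-- ===== SOURCE B (Python) =====
-- def solution(my_string):
--     # counting sort over the 128 ASCII codes of the lowercased characters
--     counts = [0] * 128
--     for x in my_string:
--         counts[ord(x.lower())] += 1
--     out = []
--     for code in range(128):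
--         out.append(chr(code) * counts[code])
--     return "".join(out)
-- ===== Notes on version B (the rewrite author's own statement) =====
-- stated objective: faster
-- what changed: Replaced the append-loop plus comparison sort with a one-pass counting sort over the 128 ASCII codes of the lowercased characters.
import Mathlib
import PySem

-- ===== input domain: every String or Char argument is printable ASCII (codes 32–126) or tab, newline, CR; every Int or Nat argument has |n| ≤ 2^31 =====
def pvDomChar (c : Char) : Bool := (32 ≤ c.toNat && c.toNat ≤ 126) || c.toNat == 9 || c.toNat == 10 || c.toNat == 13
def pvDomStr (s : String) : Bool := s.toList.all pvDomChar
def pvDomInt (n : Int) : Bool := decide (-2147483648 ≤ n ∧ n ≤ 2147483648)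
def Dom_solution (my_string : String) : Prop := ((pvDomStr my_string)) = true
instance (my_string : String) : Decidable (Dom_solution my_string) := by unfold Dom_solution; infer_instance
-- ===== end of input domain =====

-- B replaces the append-loop + comparison sort with a one-pass counting sort over the 128 ASCII codes (objective: faster).

-- ===== PORT A =====
-- 'x.isupper' (a bound method, not a call) is always truthy in Python, so the first branch always runs; ported as 'if true'.
-- Python sorts the list of one-character strings and joins; sorting one-character ASCII strings by string order
-- is sorting the characters by code point, so the list is modelled as List Char with the identity key.
def solution (my_string : String) : String :=
  let answer : List Char := my_string.toList.foldl
    (fun answer x => if true then answer ++ [PySem.Chars.lowerChar x] else answer ++ [x]) []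
  let answer := PySem.List.sorted answer (fun c => c) false
  String.ofList (PySem.Chars.join [] (answer.map (fun c => [c])))

-- ===== PORT B =====
-- range(128) is ported as List.range 128 (indices are the naturals 0..127; exact);
-- counts[i] += 1 and counts[code] are in-range accesses of the length-128 list, ported with List.set / List.getD.
def solution_alt (my_string : String) : String :=
  let counts : List Nat := my_string.toList.foldl
    (fun counts x =>
      counts.set (PySem.Chars.lowerChar x).toNat
        (counts.getD (PySem.Chars.lowerChar x).toNat 0 + 1))
    (List.replicate 128 0)
  let out : List (List Char) := (List.range 128).foldl
    (fun out code => out ++ [List.replicate (counts.getD code 0) (Char.ofNat code)]) []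
  String.ofList (PySem.Chars.join [] out)

-- ===== PRECONDITION & SPEC =====
def Spec_solution (my_string : String) (out : String) : Prop := out = solution_alt my_string
instance (my_string : String) (out : String) : Decidable (Spec_solution my_string out) := by unfold Spec_solution; infer_instance

-- ===== CLAIM (what is proved, stated in full; the proofs are below) =====
def Claim_equal_solution : Prop := ∀ (my_string : String), Dom_solution my_string → Spec_solution my_string (solution my_string)

-- ===== LEMMAS AND PROOFS =====

-- a lowercased ASCII character is still ASCII
lemma pv_lowerChar_lt (c : Char) (h : c.toNat < 128) : (PySem.Chars.lowerChar c).toNat < 128 := by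
  unfold PySem.Chars.lowerChar PySem.Chars.isupper
  split
  · rename_i hu
    rw [Char.toNat_ofNat, if_pos (Or.inl (by omega))]
    simp only [Bool.and_eq_true, decide_eq_true_eq, Char.le_def, UInt32.le_iff_toNat_le] at hu
    have hc : c.toNat = c.val.toNat := rfl
    have h1 : ('A'.val).toNat = 65 := by decide
    have h2 : ('Z'.val).toNat = 90 := by decide
    omega
  · exact h

lemma pv_toNat_ofNat (n : Nat) (h : n < 128) : (Char.ofNat n).toNat = n := by
  rw [Char.toNat_ofNat, if_pos (Or.inl (by omega))]

-- "".join over List Char pieces is flatten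
lemma pv_join_nil_flatten (l : List (List Char)) : PySem.Chars.join [] l = l.flatten := by
  induction l with
  | nil => rfl
  | cons a t ih =>
    cases t with
    | nil => simp [PySem.Chars.join, List.intercalate]
    | cons b t' =>
      simp only [PySem.Chars.join, List.intercalate, List.intersperse] at ih ⊢
      simp [ih]

lemma pv_getD_set (l : List Nat) (i v j : Nat) (h : i < l.length) :
    (l.set i v).getD j 0 = if j = i then v else l.getD j 0 := by
  simp [List.getD, List.getElem?_set]
  split
  · simp_all
  · rw [if_neg (by omega)]

-- the counting loop computes occurrence counts of the lowercased characters
lemma pv_counts_getD (s : List Char) (hs : ∀ x ∈ s, (PySem.Chars.lowerChar x).toNat < 128) :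
    ∀ (cs0 : List Nat), cs0.length = 128 → ∀ i < 128,
    (s.foldl (fun counts x =>
        counts.set (PySem.Chars.lowerChar x).toNat
          (counts.getD (PySem.Chars.lowerChar x).toNat 0 + 1)) cs0).getD i 0
      = cs0.getD i 0 + (s.map PySem.Chars.lowerChar).count (Char.ofNat i) := by
  induction s with
  | nil => intro cs0 _ i _; simp
  | cons x t ih =>
    intro cs0 h0 i hi
    have hx : (PySem.Chars.lowerChar x).toNat < 128 := hs x (by simp)
    have ht : ∀ y ∈ t, (PySem.Chars.lowerChar y).toNat < 128 := fun y hy => hs y (by simp [hy])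
    simp only [List.foldl_cons]
    rw [ih ht _ (by simp [h0]) i hi]
    rw [pv_getD_set _ _ _ _ (by rw [h0]; exact hx)]
    simp only [List.map_cons, List.count_cons]
    by_cases hc : i = (PySem.Chars.lowerChar x).toNat
    · rw [if_pos hc, ← hc]
      have he : PySem.Chars.lowerChar x = Char.ofNat i := by rw [hc, Char.ofNat_toNat]
      simp [he]
      omega
    · rw [if_neg hc]
      have hne : ¬ (PySem.Chars.lowerChar x = Char.ofNat i) := by
        intro hEq
        exact hc (by rw [hEq]; exact (pv_toNat_ofNat i hi).symm)
      simp [beq_iff_eq, hne]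

lemma pv_flatMap_singleton {α β : Type} (l : List α) (g : α → List β) :
    (l.flatMap fun c => [g c]) = l.map g := by
  induction l with
  | nil => rfl
  | cons a t ih => simp [ih]

lemma pv_sum_map_range (n : Nat) (f : Nat → Nat) :
    ((List.range n).map f).sum = ∑ i ∈ Finset.range n, f i :=
  Nat.add_zero (List.foldr (fun x1 x2 => x1 + x2) 0 (List.map f (List.range n)))

-- the concatenation of the replicate blocks is a permutation of the lowercased list
lemma pv_perm (L : List Char) (hL : ∀ x ∈ L, x.toNat < 128) (cnt : Nat → Nat)
    (hcnt : ∀ code < 128, cnt code = L.count (Char.ofNat code)) :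
    ((List.range 128).flatMap fun code => List.replicate (cnt code) (Char.ofNat code)).Perm L := by
  rw [List.perm_iff_count]
  intro a
  rw [List.count_flatMap]
  have hterm : (List.map ((fun x => List.count a x) ∘ fun code => List.replicate (cnt code) (Char.ofNat code)) (List.range 128))
      = (List.range 128).map fun code => if Char.ofNat code = a then cnt code else 0 := by
    apply List.map_congr_left
    intro code _
    simp [List.count_replicate, beq_iff_eq]
  rw [hterm, pv_sum_map_range]
  by_cases ha : a.toNat < 128
  · have hcong : ∀ i ∈ Finset.range 128,
        (if Char.ofNat i = a then cnt i else 0) = if i = a.toNat then cnt i else 0 := by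
      intro i hi
      have hi' : i < 128 := Finset.mem_range.mp hi
      congr 1
      simp only [eq_iff_iff]
      constructor
      · intro h; rw [← h, pv_toNat_ofNat i hi']
      · intro h; rw [h, Char.ofNat_toNat]
    rw [Finset.sum_congr rfl hcong, Finset.sum_ite_eq', if_pos (Finset.mem_range.mpr ha)]
    rw [hcnt a.toNat ha, Char.ofNat_toNat]
  · have hz : ∀ i ∈ Finset.range 128, (if Char.ofNat i = a then cnt i else 0) = 0 := by
      intro i hi
      rw [if_neg]
      intro h
      exact ha (by rw [← h, pv_toNat_ofNat i (Finset.mem_range.mp hi)]; exact Finset.mem_range.mp hi)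
    rw [Finset.sum_congr rfl hz, Finset.sum_const_zero]
    exact (List.count_eq_zero.mpr (fun hmem => ha (hL a hmem))).symm

-- the concatenation of the replicate blocks is sorted (≤ by code point)
lemma pv_pairwise (cnt : Nat → Nat) :
    ((List.range 128).flatMap fun code => List.replicate (cnt code) (Char.ofNat code)).Pairwise (· ≤ ·) := by
  rw [List.pairwise_flatMap]
  refine ⟨fun a _ => List.pairwise_replicate.mpr (Or.inr le_rfl), ?_⟩
  apply List.pairwise_lt_range.imp_of_mem
  intro a b ha hb hab x hx y hy
  rw [List.eq_of_mem_replicate hx, List.eq_of_mem_replicate hy]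
  rw [Char.le_def, UInt32.le_iff_toNat_le]
  have h1 : (Char.ofNat a).val.toNat = (Char.ofNat a).toNat := rfl
  have h2 : (Char.ofNat b).val.toNat = (Char.ofNat b).toNat := rfl
  rw [h1, h2, pv_toNat_ofNat a (List.mem_range.mp ha), pv_toNat_ofNat b (List.mem_range.mp hb)]
  omega

-- ===== VERDICT (by name: the statement is the Claim_ definition above) =====
theorem solution_spec : Claim_equal_solution := by
  intro my_string hDom
  unfold Spec_solution
  simp only [solution, solution_alt, if_true]
  have hs : ∀ x ∈ my_string.toList, (PySem.Chars.lowerChar x).toNat < 128 := by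
    intro x hx
    apply pv_lowerChar_lt
    have := List.all_eq_true.mp hDom x hx
    simp only [pvDomChar, Bool.or_eq_true, Bool.and_eq_true, decide_eq_true_eq, beq_iff_eq] at this
    omega
  rw [PySem.List.foldl_append_singleton_eq_map, List.nil_append,
      PySem.Chars.join_nil_singletons,
      PySem.List.foldl_append_eq_flatMap, List.nil_append,
      pv_join_nil_flatten, pv_flatMap_singleton, ← List.flatMap_def]
  congr 1
  set L := my_string.toList.map PySem.Chars.lowerChar with hLdef
  set counts := my_string.toList.foldl
    (fun counts x =>
      counts.set (PySem.Chars.lowerChar x).toNat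
        (counts.getD (PySem.Chars.lowerChar x).toNat 0 + 1))
    (List.replicate 128 0) with hC
  apply PySem.List.sorted_id_eq_of_perm_of_pairwise
  · apply pv_perm
    · intro x hxL
      rcases List.mem_map.mp hxL with ⟨y, hy, rfl⟩
      exact hs y hy
    · intro code hcode
      rw [hC, pv_counts_getD my_string.toList hs _ (by simp) code hcode,
          List.getD_replicate 0 hcode, Nat.zero_add, hLdef]
  · exact pv_pairwise _
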